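-- pv_equiv track=rewrite | github.com/Momofil31/evolutionary-cluster-editing | graph.py | compute_solution
-- ===== SOURCE A (Python) =====
-- def compute_solution(individual, graph):
--     added_edges = set()
--     removed_edges = set()
--
--     for i in range(len(graph)):
--         for j in range(i + 1, len(graph)):
--             if individual[i] == individual[j]:
--                 if j not in graph[i] and i not in graph[j]:
--                     added_edges.add((i, j))
--             else:
--                 if j in graph[i] and i in graph[j]:
--                     removed_edges.add((i, j))
--
--     return added_edges, removed_edges
-- ===== SOURCE B (Python) =====
-- def compute_solution(individual, graph):
--     n = len(graph)
--     labels = individual[:n]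
--     # group node indices by cluster label
--     members = {}
--     for i, lbl in enumerate(labels):
--         members.setdefault(lbl, []).append(i)
--     # adjacency sets for O(1) membership tests
--     adj = [set(row) for row in graph]
--     added = set()
--     removed = set()
--     for i, lbl in enumerate(labels):
--         # added edges: only same-cluster partners are candidates
--         for j in members[lbl]:
--             if i < j and j not in adj[i] and i not in adj[j]:
--                 added.add((i, j))
--         # removed edges: only listed neighbours are candidates
--         for j in sorted(adj[i]):
--             if i < j < n and lbl != labels[j] and i in adj[j]:
--                 removed.add((i, j))
--     return added, removed
-- ===== Notes on version B (the rewrite author's own statement) =====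
-- stated objective: faster
-- what changed: Instead of scanning all O(n^2) index pairs with linear list-membership tests, B groups node indices by cluster label (dict) so added-edge candidates are only same-cluster pairs, precomputes per-node adjacency sets for O(1) membership, and finds removed edges by scanning only each node's listed neighbours.
import Mathlib
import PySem

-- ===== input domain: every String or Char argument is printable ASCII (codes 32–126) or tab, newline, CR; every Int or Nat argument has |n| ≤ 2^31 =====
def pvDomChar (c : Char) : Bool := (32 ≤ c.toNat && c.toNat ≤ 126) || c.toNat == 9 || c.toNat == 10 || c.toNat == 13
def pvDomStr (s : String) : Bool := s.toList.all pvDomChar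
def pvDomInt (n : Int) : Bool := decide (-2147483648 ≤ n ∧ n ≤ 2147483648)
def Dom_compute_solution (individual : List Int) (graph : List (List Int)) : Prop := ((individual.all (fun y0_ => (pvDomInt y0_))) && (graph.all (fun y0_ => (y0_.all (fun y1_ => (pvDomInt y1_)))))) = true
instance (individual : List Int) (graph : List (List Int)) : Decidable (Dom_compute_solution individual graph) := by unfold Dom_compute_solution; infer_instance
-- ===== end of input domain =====

-- B groups the nodes by cluster label and keeps per-node adjacency sets, so added edges are
-- searched only among same-cluster pairs and removed edges only among listed neighbours,
-- instead of A's scan of all O(n^2) index pairs with list-membership tests inside.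

-- ===== PORT A =====
def compute_solution (individual : List Int) (graph : List (List Int)) : (List (Int × Int)) × (List (Int × Int)) :=
  (PySem.List.pyRange 0 (graph.length : Int) 1).foldl
    (fun st i =>
      (PySem.List.pyRange (i + 1) (graph.length : Int) 1).foldl
        (fun (st : PySem.Set (Int × Int) × PySem.Set (Int × Int)) j =>
          if PySem.List.pyGetD individual i 0 = PySem.List.pyGetD individual j 0 then
            if j ∉ PySem.List.pyGetD graph i [] ∧ i ∉ PySem.List.pyGetD graph j [] then
              (PySem.Set.add st.1 (i, j), st.2)
            else st
          else
            if j ∈ PySem.List.pyGetD graph i [] ∧ i ∈ PySem.List.pyGetD graph j [] then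
              (st.1, PySem.Set.add st.2 (i, j))
            else st)
        st)
    (PySem.Set.empty, PySem.Set.empty)

-- ===== PORT B =====
def compute_solution_alt (individual : List Int) (graph : List (List Int)) : (List (Int × Int)) × (List (Int × Int)) :=
  let n : Int := graph.length
  let labels := PySem.List.slice individual none (some n)
  let members := (PySem.List.enumerate labels).foldl
    (fun (d : PySem.Dict Int (List Int)) p => d.modify p.2 [] (fun t => t ++ [p.1]))
    PySem.Dict.empty
  let adj := graph.map (fun row => PySem.Set.ofList row)
  (PySem.List.enumerate labels).foldl
    (fun (st : PySem.Set (Int × Int) × PySem.Set (Int × Int)) p =>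
      let added := (members.getD p.2 []).foldl
        (fun (s : PySem.Set (Int × Int)) j =>
          if p.1 < j ∧ j ∉ PySem.List.pyGetD adj p.1 [] ∧ p.1 ∉ PySem.List.pyGetD adj j [] then
            PySem.Set.add s (p.1, j)
          else s) st.1
      let removed := (PySem.List.sorted (PySem.List.pyGetD adj p.1 []) (fun x => x)).foldl
        (fun (s : PySem.Set (Int × Int)) j =>
          if p.1 < j ∧ j < n ∧ p.2 ≠ PySem.List.pyGetD labels j 0 ∧ p.1 ∈ PySem.List.pyGetD adj j [] then
            PySem.Set.add s (p.1, j)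
          else s) st.2
      (added, removed))
    (PySem.Set.empty, PySem.Set.empty)

-- ===== PRECONDITION & SPEC =====
-- Pre_ excludes exactly the inputs where A raises IndexError: two or more graph nodes but
-- fewer individual labels than nodes (A indexes individual[i] for every node index i).
def Pre_compute_solution (individual : List Int) (graph : List (List Int)) : Prop :=
  2 ≤ graph.length → graph.length ≤ individual.length
instance (individual : List Int) (graph : List (List Int)) : Decidable (Pre_compute_solution individual graph) := by unfold Pre_compute_solution; infer_instance
def pvWitness_compute_solution : List Int × List (List Int) := ([0, 0, 1], [[1], [0], []])

def Spec_compute_solution (individual : List Int) (graph : List (List Int)) (out : (List (Int × Int)) × (List (Int × Int))) : Prop := out = compute_solution_alt individual graph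
instance (individual : List Int) (graph : List (List Int)) (out : (List (Int × Int)) × (List (Int × Int))) : Decidable (Spec_compute_solution individual graph out) := by unfold Spec_compute_solution; infer_instance

-- ===== CLAIM (what is proved, stated in full; the proofs are below) =====
def Claim_equal_compute_solution : Prop := ∀ (individual : List Int) (graph : List (List Int)), Dom_compute_solution individual graph → Pre_compute_solution individual graph → Spec_compute_solution individual graph (compute_solution individual graph)

-- ===== LEMMAS AND PROOFS =====

-- abbreviations for B's intermediate data (proof helpers only)
def pvLabels (individual : List Int) (graph : List (List Int)) : List Int :=
  PySem.List.slice individual none (some (graph.length : Int))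

def pvMembers (individual : List Int) (graph : List (List Int)) : PySem.Dict Int (List Int) :=
  (PySem.List.enumerate (pvLabels individual graph)).foldl
    (fun d p => d.modify p.2 [] (fun t => t ++ [p.1])) PySem.Dict.empty

def pvAdj (graph : List (List Int)) : List (PySem.Set Int) :=
  graph.map (fun row => PySem.Set.ofList row)

-- A's pair conditions, as Booleans
def pvCA (individual : List Int) (graph : List (List Int)) (i j : Int) : Bool :=
  decide (PySem.List.pyGetD individual i 0 = PySem.List.pyGetD individual j 0 ∧
          j ∉ PySem.List.pyGetD graph i [] ∧ i ∉ PySem.List.pyGetD graph j [])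

def pvCR (individual : List Int) (graph : List (List Int)) (i j : Int) : Bool :=
  decide (¬ (PySem.List.pyGetD individual i 0 = PySem.List.pyGetD individual j 0) ∧
          j ∈ PySem.List.pyGetD graph i [] ∧ i ∈ PySem.List.pyGetD graph j [])

-- B's pair conditions, as Booleans
def pvPA (_individual : List Int) (graph : List (List Int)) (i j : Int) : Bool :=
  decide (i < j ∧ j ∉ PySem.List.pyGetD (pvAdj graph) i [] ∧ i ∉ PySem.List.pyGetD (pvAdj graph) j [])

def pvPR (individual : List Int) (graph : List (List Int)) (i j : Int) : Bool :=
  decide (i < j ∧ j < (graph.length : Int) ∧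
          ¬ (PySem.List.pyGetD (pvLabels individual graph) i 0 = PySem.List.pyGetD (pvLabels individual graph) j 0) ∧
          i ∈ PySem.List.pyGetD (pvAdj graph) j [])

-- per-node emitted lists, A side
def pvFA (individual : List Int) (graph : List (List Int)) (i : Int) : List (Int × Int) :=
  ((PySem.List.pyRange (i + 1) (graph.length : Int) 1).filter (pvCA individual graph i)).map (fun j => (i, j))

def pvFR (individual : List Int) (graph : List (List Int)) (i : Int) : List (Int × Int) :=
  ((PySem.List.pyRange (i + 1) (graph.length : Int) 1).filter (pvCR individual graph i)).map (fun j => (i, j))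

-- per-node emitted lists, B side
def pvGA (individual : List Int) (graph : List (List Int)) (i : Int) : List (Int × Int) :=
  (((pvMembers individual graph).getD (PySem.List.pyGetD (pvLabels individual graph) i 0) []).filter
    (pvPA individual graph i)).map (fun j => (i, j))

def pvGR (individual : List Int) (graph : List (List Int)) (i : Int) : List (Int × Int) :=
  ((PySem.List.sorted (PySem.List.pyGetD (pvAdj graph) i []) (fun x => x)).filter
    (pvPR individual graph i)).map (fun j => (i, j))

-- a conditional Set.add loop over fresh, duplicate-free candidates appends the filtered pairs
lemma pv_setfold (i : Int) (p : Int → Bool) (js : List Int) (s : PySem.Set (Int × Int))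
    (hnd : js.Nodup) (hf : ∀ j ∈ js, (i, j) ∉ s) :
    js.foldl (fun s j => if p j then PySem.Set.add s (i, j) else s) s
      = s ++ (js.filter p).map (fun j => (i, j)) := by
  induction js generalizing s with
  | nil => simp
  | cons j js ih =>
    rw [List.foldl_cons]
    by_cases hp : p j
    · rw [if_pos hp, PySem.Set.add_of_not_mem (hf j (List.mem_cons_self))]
      rw [ih (s ++ [(i, j)]) hnd.of_cons]
      · simp [hp]
      · intro j' hj' hmem
        rcases List.mem_append.1 hmem with h | h
        · exact hf j' (List.mem_cons_of_mem _ hj') h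
        · simp at h
          exact (List.nodup_cons.1 hnd).1 (h ▸ hj')
    · rw [if_neg hp, ih s hnd.of_cons (fun j' hj' => hf j' (List.mem_cons_of_mem _ hj'))]
      simp [hp]

-- the outer loop: a step that appends per-node lists keyed by the node index
lemma pv_outer (T : Int) (F G : Int → List (Int × Int))
    (step : PySem.Set (Int × Int) × PySem.Set (Int × Int) → Int → PySem.Set (Int × Int) × PySem.Set (Int × Int))
    (hF : ∀ i p, p ∈ F i → p.1 = i) (hG : ∀ i p, p ∈ G i → p.1 = i)
    (hstep : ∀ i (s1 s2 : PySem.Set (Int × Int)), (∀ p ∈ s1, p.1 < i) → (∀ p ∈ s2, p.1 < i) →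
      step (s1, s2) i = (s1 ++ F i, s2 ++ G i)) :
    ∀ (k : Nat) (m : Int), (T - m).toNat ≤ k →
      ∀ (s1 s2 : PySem.Set (Int × Int)), (∀ p ∈ s1, p.1 < m) → (∀ p ∈ s2, p.1 < m) →
      (PySem.List.pyRange m T 1).foldl step (s1, s2)
        = (s1 ++ (PySem.List.pyRange m T 1).flatMap F, s2 ++ (PySem.List.pyRange m T 1).flatMap G) := by
  intro k
  induction k with
  | zero =>
    intro m hk s1 s2 h1 h2
    rw [PySem.List.pyRange_one_eq_nil (by omega)]; simp
  | succ k ih =>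
    intro m hk s1 s2 h1 h2
    by_cases hm : m < T
    · rw [PySem.List.pyRange_one_cons hm]
      simp only [List.foldl_cons, List.flatMap_cons]
      rw [hstep m s1 s2 h1 h2]
      rw [ih (m + 1) (by omega) _ _ ?inv1 ?inv2]
      · simp
      case inv1 =>
        intro p hp
        rcases List.mem_append.1 hp with h | h
        · exact lt_trans (h1 p h) (by omega)
        · rw [hF m p h]; omega
      case inv2 =>
        intro p hp
        rcases List.mem_append.1 hp with h | h
        · exact lt_trans (h2 p h) (by omega)
        · rw [hG m p h]; omega
    · rw [PySem.List.pyRange_one_eq_nil (by omega)]; simp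

-- A's inner loop body as a pair of independent conditional adds
lemma pv_A_step (individual : List Int) (graph : List (List Int)) (i : Int) :
    (fun (st : PySem.Set (Int × Int) × PySem.Set (Int × Int)) j =>
      if PySem.List.pyGetD individual i 0 = PySem.List.pyGetD individual j 0 then
        if j ∉ PySem.List.pyGetD graph i [] ∧ i ∉ PySem.List.pyGetD graph j [] then
          (PySem.Set.add st.1 (i, j), st.2)
        else st
      else
        if j ∈ PySem.List.pyGetD graph i [] ∧ i ∈ PySem.List.pyGetD graph j [] then
          (st.1, PySem.Set.add st.2 (i, j))
        else st)
    = (fun st j =>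
        ((if pvCA individual graph i j then PySem.Set.add st.1 (i, j) else st.1),
         (if pvCR individual graph i j then PySem.Set.add st.2 (i, j) else st.2))) := by
  funext st j
  by_cases h1 : PySem.List.pyGetD individual i 0 = PySem.List.pyGetD individual j 0 <;>
    by_cases h2 : j ∈ PySem.List.pyGetD graph i [] <;>
    by_cases h3 : i ∈ PySem.List.pyGetD graph j [] <;>
    simp [pvCA, pvCR, h1, h2, h3]

-- A computes, per node i, exactly the filtered candidate lists pvFA / pvFR
lemma pv_A_char (individual : List Int) (graph : List (List Int)) :
    compute_solution individual graph
      = ((PySem.List.pyRange 0 (graph.length : Int) 1).flatMap (pvFA individual graph),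
         (PySem.List.pyRange 0 (graph.length : Int) 1).flatMap (pvFR individual graph)) := by
  unfold compute_solution
  rw [pv_outer (graph.length : Int) (pvFA individual graph) (pvFR individual graph) _
      ?hF ?hG ?hstep ((graph.length : Int) - 0).toNat 0 (le_refl _) _ _ (by simp [PySem.Set.empty]) (by simp [PySem.Set.empty])]
  · simp [PySem.Set.empty]
  case hF => intro i p hp; simp only [pvFA, List.mem_map] at hp; obtain ⟨j, -, h⟩ := hp; subst h; rfl
  case hG => intro i p hp; simp only [pvFR, List.mem_map] at hp; obtain ⟨j, -, h⟩ := hp; subst h; rfl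
  case hstep =>
    intro i s1 s2 h1 h2
    rw [pv_A_step individual graph i,
        PySem.List.foldl_prod_mk
          (fun s j => if pvCA individual graph i j then PySem.Set.add s (i, j) else s)
          (fun s j => if pvCR individual graph i j then PySem.Set.add s (i, j) else s)]
    rw [pv_setfold i (pvCA individual graph i) _ s1 (PySem.List.nodup_pyRange_one _ _)
        (fun j _ hmem => by have := h1 _ hmem; simp at this),
        pv_setfold i (pvCR individual graph i) _ s2 (PySem.List.nodup_pyRange_one _ _)
        (fun j _ hmem => by have := h2 _ hmem; simp at this)]
    rfl


-- grouping loop: lookup of a key returns the first components of the pairs carrying that key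
lemma pv_members_getD (l : List (Int × Int)) (d : PySem.Dict Int (List Int)) (key : Int) :
    (l.foldl (fun d p => d.modify p.2 [] (fun t => t ++ [p.1])) d).getD key []
      = d.getD key [] ++ (l.filter (fun p => p.2 == key)).map (fun p => p.1) := by
  induction l generalizing d with
  | nil => simp
  | cons p l ih =>
    rw [List.foldl_cons, ih]
    by_cases h : p.2 = key
    · subst h
      rw [PySem.Dict.getD_modify_self]
      simp
    · rw [PySem.Dict.getD_modify_of_ne _ _ _ (fun hc => h hc.symm)]
      simp [h]

lemma pv_members_eq (individual : List Int) (graph : List (List Int)) (key : Int) :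
    (pvMembers individual graph).getD key []
      = (PySem.List.pyRange 0 (PySem.List.len (pvLabels individual graph)) 1).filter
          (fun j => PySem.List.pyGetD (pvLabels individual graph) j 0 == key) := by
  unfold pvMembers
  rw [pv_members_getD, PySem.List.enumerate_eq_map_pyRange _ 0, List.filter_map, List.map_map]
  simp [pysem, Function.comp_def]

lemma pv_adj_getD (graph : List (List Int)) (i : Int) :
    PySem.List.pyGetD (pvAdj graph) i [] = PySem.Set.ofList (PySem.List.pyGetD graph i []) :=
  PySem.List.pyGetD_map _ graph i []

-- B's two inner-loop bodies, conditions named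
lemma pv_B_stepA (individual : List Int) (graph : List (List Int)) (i : Int) :
    (fun (s : PySem.Set (Int × Int)) j =>
      if i < j ∧ j ∉ PySem.List.pyGetD (pvAdj graph) i [] ∧ i ∉ PySem.List.pyGetD (pvAdj graph) j [] then
        PySem.Set.add s (i, j) else s)
    = (fun s j => if pvPA individual graph i j then PySem.Set.add s (i, j) else s) := by
  funext s j
  by_cases h : i < j ∧ j ∉ PySem.List.pyGetD (pvAdj graph) i [] ∧ i ∉ PySem.List.pyGetD (pvAdj graph) j [] <;>
    simp [pvPA, h]

lemma pv_B_stepR (individual : List Int) (graph : List (List Int)) (i : Int) :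
    (fun (s : PySem.Set (Int × Int)) j =>
      if i < j ∧ j < (graph.length : Int) ∧
          PySem.List.pyGetD (pvLabels individual graph) i 0 ≠ PySem.List.pyGetD (pvLabels individual graph) j 0 ∧
          i ∈ PySem.List.pyGetD (pvAdj graph) j [] then
        PySem.Set.add s (i, j) else s)
    = (fun s j => if pvPR individual graph i j then PySem.Set.add s (i, j) else s) := by
  funext s j
  by_cases h : i < j ∧ j < (graph.length : Int) ∧
      PySem.List.pyGetD (pvLabels individual graph) i 0 ≠ PySem.List.pyGetD (pvLabels individual graph) j 0 ∧
      i ∈ PySem.List.pyGetD (pvAdj graph) j [] <;>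
    simp [pvPR, h]

lemma pv_nodup_members (individual : List Int) (graph : List (List Int)) (key : Int) :
    ((pvMembers individual graph).getD key []).Nodup := by
  rw [pv_members_eq]
  exact (PySem.List.nodup_pyRange_one _ _).filter _

lemma pv_nodup_sorted_adj (graph : List (List Int)) (i : Int) :
    (PySem.List.sorted (PySem.List.pyGetD (pvAdj graph) i []) (fun x => x)).Nodup := by
  rw [pv_adj_getD]
  exact (PySem.List.sorted_ofList_pairwise_lt _).imp (fun h => ne_of_lt h)

-- B computes, per node i, exactly the filtered candidate lists pvGA / pvGR
lemma pv_B_char (individual : List Int) (graph : List (List Int)) :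
    compute_solution_alt individual graph
      = ((PySem.List.pyRange 0 (PySem.List.len (pvLabels individual graph)) 1).flatMap (pvGA individual graph),
         (PySem.List.pyRange 0 (PySem.List.len (pvLabels individual graph)) 1).flatMap (pvGR individual graph)) := by
  have h0 : compute_solution_alt individual graph
      = (PySem.List.enumerate (pvLabels individual graph)).foldl
          (fun (st : PySem.Set (Int × Int) × PySem.Set (Int × Int)) p =>
            (((pvMembers individual graph).getD p.2 []).foldl
               (fun s j =>
                 if p.1 < j ∧ j ∉ PySem.List.pyGetD (pvAdj graph) p.1 [] ∧ p.1 ∉ PySem.List.pyGetD (pvAdj graph) j [] then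
                   PySem.Set.add s (p.1, j) else s) st.1,
             (PySem.List.sorted (PySem.List.pyGetD (pvAdj graph) p.1 []) (fun x => x)).foldl
               (fun s j =>
                 if p.1 < j ∧ j < (graph.length : Int) ∧ p.2 ≠ PySem.List.pyGetD (pvLabels individual graph) j 0 ∧
                     p.1 ∈ PySem.List.pyGetD (pvAdj graph) j [] then
                   PySem.Set.add s (p.1, j) else s) st.2))
          (PySem.Set.empty, PySem.Set.empty) := rfl
  rw [h0, PySem.List.enumerate_eq_map_pyRange (pvLabels individual graph) 0, List.foldl_map]
  rw [pv_outer (PySem.List.len (pvLabels individual graph)) (pvGA individual graph) (pvGR individual graph) _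
      ?hF ?hG ?hstep (PySem.List.len (pvLabels individual graph) - 0).toNat 0 (le_refl _) _ _
      (by simp [PySem.Set.empty]) (by simp [PySem.Set.empty])]
  · simp [PySem.Set.empty]
  case hF => intro i p hp; simp only [pvGA, List.mem_map] at hp; obtain ⟨j, -, h⟩ := hp; subst h; rfl
  case hG => intro i p hp; simp only [pvGR, List.mem_map] at hp; obtain ⟨j, -, h⟩ := hp; subst h; rfl
  case hstep =>
    intro i s1 s2 h1 h2
    dsimp only
    rw [pv_B_stepA individual graph i, pv_B_stepR individual graph i]
    rw [pv_setfold i (pvPA individual graph i) _ s1 (pv_nodup_members individual graph _)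
        (fun j _ hmem => by have := h1 _ hmem; simp at this),
        pv_setfold i (pvPR individual graph i) _ s2 (pv_nodup_sorted_adj graph i)
        (fun j _ hmem => by have := h2 _ hmem; simp at this)]
    rfl

-- labels facts (main case: at least as many labels as nodes)
lemma pv_labels_len (individual : List Int) (graph : List (List Int))
    (hle : graph.length ≤ individual.length) :
    (pvLabels individual graph).length = graph.length := by
  unfold pvLabels
  rw [PySem.List.slice_to individual (by positivity)]
  simp
  omega

lemma pv_labels_getD (individual : List Int) (graph : List (List Int))
    (hle : graph.length ≤ individual.length) (k : Int) (h0 : 0 ≤ k) (hk : k < (graph.length : Int)) :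
    PySem.List.pyGetD (pvLabels individual graph) k 0 = PySem.List.pyGetD individual k 0 := by
  have hlen : (pvLabels individual graph).length = graph.length := pv_labels_len individual graph hle
  rw [PySem.List.pyGetD_eq_getElem _ _ h0 (by omega),
      PySem.List.pyGetD_eq_getElem _ _ h0 (by exact_mod_cast lt_of_lt_of_le hk (by exact_mod_cast hle))]
  unfold pvLabels
  simp only [PySem.List.slice_to individual (by positivity : (0:Int) ≤ (graph.length : Int))]
  exact List.getElem_take

-- strictly increasing integer lists with the same members are equal
lemma pv_sorted_ext (l1 l2 : List Int) (h1 : l1.Pairwise (· < ·)) (h2 : l2.Pairwise (· < ·))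
    (hm : ∀ x, x ∈ l1 ↔ x ∈ l2) : l1 = l2 := by
  have hperm : l1.Perm l2 :=
    (List.perm_ext_iff_of_nodup (h1.imp fun h => ne_of_lt h) (h2.imp fun h => ne_of_lt h)).mpr hm
  exact List.Perm.eq_of_pairwise (fun a b _ _ hab hba => by omega) h1 h2 hperm

-- per-node equality of the two added-edge candidate lists
lemma pv_GA_eq (individual : List Int) (graph : List (List Int))
    (hle : graph.length ≤ individual.length) (i : Int) (h0 : 0 ≤ i) (hi : i < (graph.length : Int)) :
    pvGA individual graph i = pvFA individual graph i := by
  have hL : PySem.List.len (pvLabels individual graph) = (graph.length : Int) := by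
    rw [PySem.List.len_eq, pv_labels_len individual graph hle]
  unfold pvGA pvFA
  congr 1
  rw [pv_members_eq, List.filter_filter, hL,
      PySem.List.pyRange_one_append 0 (i + 1) (graph.length : Int) (by omega) (by omega),
      List.filter_append,
      (List.filter_eq_nil_iff).2 (fun j hj => by
        rw [PySem.List.mem_pyRange_one] at hj
        simp only [pvPA, Bool.and_eq_true, decide_eq_true_eq, beq_iff_eq, not_and]
        rintro ⟨h1, -⟩ -
        omega),
      List.nil_append]
  apply List.filter_congr
  intro j hj
  rw [PySem.List.mem_pyRange_one] at hj
  have hj0 : (0:Int) ≤ j := by omega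
  simp only [pvPA, pvCA, pv_adj_getD, PySem.Set.mem_ofList,
    pv_labels_getD individual graph hle i h0 hi,
    pv_labels_getD individual graph hle j hj0 (by omega)]
  have hij : i < j := by omega
  by_cases h1 : PySem.List.pyGetD individual i 0 = PySem.List.pyGetD individual j 0
  · simp [h1, hij]
  · have h1' : ¬ (PySem.List.pyGetD individual j 0 = PySem.List.pyGetD individual i 0) :=
      fun h => h1 h.symm
    simp [h1, h1']

-- per-node equality of the two removed-edge candidate lists
lemma pv_GR_eq (individual : List Int) (graph : List (List Int))
    (hle : graph.length ≤ individual.length) (i : Int) (h0 : 0 ≤ i) (hi : i < (graph.length : Int)) :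
    pvGR individual graph i = pvFR individual graph i := by
  unfold pvGR pvFR
  congr 1
  apply pv_sorted_ext
  · exact (by rw [pv_adj_getD]; exact PySem.List.sorted_ofList_pairwise_lt _ :
      (PySem.List.sorted (PySem.List.pyGetD (pvAdj graph) i []) (fun x => x)).Pairwise (· < ·)).filter _
  · exact (PySem.List.pairwise_lt_pyRange_one _ _).filter _
  · intro x
    simp only [List.mem_filter, PySem.List.mem_sorted, pv_adj_getD, PySem.Set.mem_ofList,
      PySem.List.mem_pyRange_one, pvPR, pvCR, decide_eq_true_eq]
    constructor
    · rintro ⟨hrow, hlt, hltN, hne, hmem⟩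
      have hx0 : (0:Int) ≤ x := by omega
      rw [pv_labels_getD individual graph hle i h0 hi, pv_labels_getD individual graph hle x hx0 hltN] at hne
      exact ⟨⟨by omega, hltN⟩, hne, hrow, hmem⟩
    · rintro ⟨⟨hge, hltN⟩, hne, hrow, hmem⟩
      have hx0 : (0:Int) ≤ x := by omega
      refine ⟨hrow, by omega, hltN, ?_, hmem⟩
      rw [pv_labels_getD individual graph hle i h0 hi, pv_labels_getD individual graph hle x hx0 hltN]
      exact hne


-- ===== VERDICT (by name: the statement is the Claim_ definition above) =====
theorem compute_solution_spec : Claim_equal_compute_solution := by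
  intro individual graph hDom hPre
  unfold Spec_compute_solution
  rw [pv_A_char, pv_B_char]
  by_cases hle : graph.length <= individual.length
  · have hL : PySem.List.len (pvLabels individual graph) = (graph.length : Int) := by
      rw [PySem.List.len_eq, pv_labels_len individual graph hle]
    rw [hL]
    simp only [Prod.mk.injEq]
    constructor
    · apply List.flatMap_congr
      intro i hi
      rw [PySem.List.mem_pyRange_one] at hi
      exact (pv_GA_eq individual graph hle i hi.1 hi.2).symm
    · apply List.flatMap_congr
      intro i hi
      rw [PySem.List.mem_pyRange_one] at hi
      exact (pv_GR_eq individual graph hle i hi.1 hi.2).symm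
  · have hn1 : graph.length = 1 := by
      unfold Pre_compute_solution at hPre
      omega
    have hind : individual = [] := by
      have := List.length_eq_zero_iff.mp (by omega : individual.length = 0)
      exact this
    have hlab : pvLabels individual graph = [] := by
      subst hind
      unfold pvLabels
      rw [PySem.List.slice_to _ (by positivity)]
      simp
    rw [hlab]
    have hr1 : PySem.List.pyRange 0 (graph.length : Int) 1 = [0] := by
      rw [hn1]
      rw [PySem.List.pyRange_one_cons (by norm_num), PySem.List.pyRange_one_eq_nil (by norm_num)]
    have hFA : pvFA individual graph 0 = [] := by
      unfold pvFA
      rw [hn1]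
      rw [PySem.List.pyRange_one_eq_nil (by norm_num)]
      simp
    have hFR : pvFR individual graph 0 = [] := by
      unfold pvFR
      rw [hn1]
      rw [PySem.List.pyRange_one_eq_nil (by norm_num)]
      simp
    rw [hr1]
    simp [hFA, hFR, PySem.List.len, PySem.List.pyRange_one_eq_nil]
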